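-- pv_equiv track=rewrite | github.com/JCLLi/EvMarkRec | DataVidGen.py | imageTranslate
-- ===== SOURCE A (Python) =====
-- def imageTranslate(destination, num_frame):
--     num_des = len(destination)
--     res = num_frame % num_des
--
--     image_offset = []
--     offset_x = 0
--     offset_y = 0
--
--     num_mid_des = int(num_frame / num_des)
--     for j in range(len(destination)):
--         if (j == len(destination) - 1) & (res != 0):
--             num_mid_des = num_mid_des + res
--         for i in range(num_mid_des):
--             image_offset.append([offset_x, offset_y])
--             if j == 0:
--                 offset_x += int(destination[j][0] / num_mid_des)
--                 offset_y += int(destination[j][1] / num_mid_des)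
--             else:
--                 offset_x += int((destination[j][0] - destination[j - 1][0]) / num_mid_des)
--                 offset_y += int((destination[j][1] - destination[j - 1][1]) / num_mid_des)
--
--     return image_offset
-- ===== SOURCE B (Python) =====
-- def imageTranslate(destination, num_frame):
--     # Frame-indexed closed form: each output row is computed independently from
--     # its global frame index t (segment j = t // base), no per-frame accumulation.
--     n = len(destination)
--     base = int(num_frame / n)
--     res = num_frame % n
--
--     def cnt(j):
--         return base + res if (j == n - 1 and res != 0) else base
--
--     def step(j, c):
--         if cnt(j) <= 0:
--             return 0
--         prev = destination[j - 1][c] if j > 0 else 0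
--         return int((destination[j][c] - prev) / cnt(j))
--
--     start = [[0, 0]]
--     for j in range(n - 1):
--         start.append([start[j][0] + cnt(j) * step(j, 0),
--                       start[j][1] + cnt(j) * step(j, 1)])
--
--     total = base * (n - 1) + cnt(n - 1) if base > 0 else max(cnt(n - 1), 0)
--
--     def row(t):
--         if base > 0:
--             j = min(t // base, n - 1)
--             i = t - j * base
--         else:
--             j = n - 1
--             i = t
--         return [start[j][0] + i * step(j, 0), start[j][1] + i * step(j, 1)]
--
--     return [row(t) for t in range(total)]
-- ===== Notes on version B (the rewrite author's own statement) =====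
-- stated objective: alternative
-- what changed: Replaces A's sequential per-frame accumulation (running offset updated by an int()-truncated step on every emitted frame) by a frame-indexed closed form: a per-segment start/step table is built once, then each output row is computed independently from its global frame index t with segment = min(t // base, n-1), so rows are random-access formulas rather than loop state.
import Mathlib
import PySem

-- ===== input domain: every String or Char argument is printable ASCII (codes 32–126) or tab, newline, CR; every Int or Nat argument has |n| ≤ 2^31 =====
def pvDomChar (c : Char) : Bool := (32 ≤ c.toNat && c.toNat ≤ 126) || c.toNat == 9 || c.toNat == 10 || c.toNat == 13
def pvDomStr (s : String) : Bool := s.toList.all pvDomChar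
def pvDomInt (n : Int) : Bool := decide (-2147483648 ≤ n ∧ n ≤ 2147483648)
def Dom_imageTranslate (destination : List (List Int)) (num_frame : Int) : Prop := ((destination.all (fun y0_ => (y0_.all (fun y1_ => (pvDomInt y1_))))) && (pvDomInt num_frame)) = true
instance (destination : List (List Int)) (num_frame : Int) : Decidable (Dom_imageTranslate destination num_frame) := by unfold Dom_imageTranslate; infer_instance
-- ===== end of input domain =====

-- B replaces A's sequential per-frame accumulation by a frame-indexed closed form: a
-- per-segment start/step table, then each output row computed independently from its
-- global frame index t via j = t // base; alternative decomposition, no speed claim.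

-- ===== PORT A =====
-- destination[j][k] totalized with defaults; Pre_ keeps every indexing in range.
def pvGet2 (xs : List (List Int)) (j : Int) (k : Int) : Int :=
  PySem.List.pyGetD (PySem.List.pyGetD xs j []) k 0

-- loop body of A's 'for j in range(len(destination))'; state = (num_mid_des, offset_x, offset_y, image_offset)
def pvBodyA (dest : List (List Int)) (res : Int) (st : Int × Int × Int × List (List Int)) (j : Nat) :
    Int × Int × Int × List (List Int) :=
  let nmd := if j = dest.length - 1 ∧ res ≠ 0 then st.1 + res else st.1
  let inner := (List.range nmd.toNat).foldl (fun st2 _ =>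
      if j = 0 then
        (st2.1 + PySem.Int.truncdiv (pvGet2 dest (j : Int) 0) nmd,
         st2.2.1 + PySem.Int.truncdiv (pvGet2 dest (j : Int) 1) nmd,
         st2.2.2 ++ [[st2.1, st2.2.1]])
      else
        (st2.1 + PySem.Int.truncdiv (pvGet2 dest (j : Int) 0 - pvGet2 dest ((j : Int) - 1) 0) nmd,
         st2.2.1 + PySem.Int.truncdiv (pvGet2 dest (j : Int) 1 - pvGet2 dest ((j : Int) - 1) 1) nmd,
         st2.2.2 ++ [[st2.1, st2.2.1]]))
    (st.2.1, st.2.2.1, st.2.2.2)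
  (nmd, inner)

def imageTranslate (destination : List (List Int)) (num_frame : Int) : List (List Int) :=
  let num_des : Int := (destination.length : Int)
  let res := PySem.Int.mod num_frame num_des
  ((List.range destination.length).foldl (pvBodyA destination res)
    (PySem.Int.truncdiv num_frame num_des, 0, 0, ([] : List (List Int)))).2.2.2

-- ===== PORT B =====
-- B's helper cnt(j)
def pvCntB (n : Nat) (base res : Int) (j : Int) : Int :=
  if j = (n : Int) - 1 ∧ res ≠ 0 then base + res else base

-- B's helper step(j, c)
def pvStepB (dest : List (List Int)) (n : Nat) (base res : Int) (j : Int) (c : Int) : Int :=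
  if pvCntB n base res j ≤ 0 then 0
  else
    let prev := if 0 < j then pvGet2 dest (j - 1) c else 0
    PySem.Int.truncdiv (pvGet2 dest j c - prev) (pvCntB n base res j)

def imageTranslate_alt (destination : List (List Int)) (num_frame : Int) : List (List Int) :=
  let n := destination.length
  let base := PySem.Int.truncdiv num_frame (n : Int)
  let res := PySem.Int.mod num_frame (n : Int)
  -- 'start' table built by the for-loop over range(n - 1)
  let start := (List.range (n - 1)).foldl (fun st (j : Nat) =>
      st ++ [[pvGet2 st (j : Int) 0 + pvCntB n base res (j : Int) * pvStepB destination n base res (j : Int) 0,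
              pvGet2 st (j : Int) 1 + pvCntB n base res (j : Int) * pvStepB destination n base res (j : Int) 1]])
      [[0, 0]]
  let total : Int := if 0 < base then base * ((n : Int) - 1) + pvCntB n base res ((n : Int) - 1)
                     else max (pvCntB n base res ((n : Int) - 1)) 0
  -- the comprehension [row(t) for t in range(total)]
  (List.range total.toNat).map (fun (t : Nat) =>
    let ji : Int × Int :=
      if 0 < base then
        let j := min (PySem.Int.floordiv (t : Int) base) ((n : Int) - 1)
        (j, (t : Int) - j * base)
      else ((n : Int) - 1, (t : Int))
    [pvGet2 start ji.1 0 + ji.2 * pvStepB destination n base res ji.1 0,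
     pvGet2 start ji.1 1 + ji.2 * pvStepB destination n base res ji.1 1])

-- ===== PRECONDITION & SPEC =====
-- Pre_ excludes exactly the inputs where Python A raises: the empty destination
-- (ZeroDivisionError on num_frame % 0) and inputs where a segment that emits at least one
-- frame indexes a row with fewer than 2 entries (IndexError).
def Pre_imageTranslate (destination : List (List Int)) (num_frame : Int) : Prop :=
  destination ≠ [] ∧
  ∀ j < destination.length,
    (0 < (if j = destination.length - 1 ∧ PySem.Int.mod num_frame (destination.length : Int) ≠ 0
          then PySem.Int.truncdiv num_frame (destination.length : Int) +
               PySem.Int.mod num_frame (destination.length : Int)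
          else PySem.Int.truncdiv num_frame (destination.length : Int))) →
    2 ≤ (destination.getD j []).length ∧ (j = 0 ∨ 2 ≤ (destination.getD (j - 1) []).length)
instance (destination : List (List Int)) (num_frame : Int) : Decidable (Pre_imageTranslate destination num_frame) := by unfold Pre_imageTranslate; infer_instance

def pvWitness_imageTranslate : List (List Int) × Int := ([[10, 4], [3, -7], [20, 20]], 10)

def Spec_imageTranslate (destination : List (List Int)) (num_frame : Int) (out : List (List Int)) : Prop := out = imageTranslate_alt destination num_frame
instance (destination : List (List Int)) (num_frame : Int) (out : List (List Int)) : Decidable (Spec_imageTranslate destination num_frame out) := by unfold Spec_imageTranslate; infer_instance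

-- ===== CLAIM (what is proved, stated in full; the proofs are below) =====
def Claim_equal_imageTranslate : Prop := ∀ (destination : List (List Int)) (num_frame : Int), Dom_imageTranslate destination num_frame → Pre_imageTranslate destination num_frame → Spec_imageTranslate destination num_frame (imageTranslate destination num_frame)

-- ===== LEMMAS AND PROOFS =====

-- the per-segment data both loops realize (proof-only vocabulary)
def pvSegCnt (n : Nat) (base res : Int) (j : Nat) : Int :=
  if j = n - 1 ∧ res ≠ 0 then base + res else base

def pvSegStep (dest : List (List Int)) (n : Nat) (base res : Int) (c : Int) (j : Nat) : Int :=
  PySem.Int.truncdiv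
    (pvGet2 dest (j : Int) c - (if j = 0 then (0 : Int) else pvGet2 dest ((j : Int) - 1) c))
    (pvSegCnt n base res j)

def pvSegStart (dest : List (List Int)) (n : Nat) (base res : Int) (c : Int) : Nat → Int
  | 0 => 0
  | j + 1 => pvSegStart dest n base res c j +
      ((pvSegCnt n base res j).toNat : Int) * pvSegStep dest n base res c j

def pvOut (dest : List (List Int)) (n : Nat) (base res : Int) (k : Nat) : List (List Int) :=
  (List.range k).flatMap (fun j =>
    (List.range (pvSegCnt n base res j).toNat).map (fun (i : Nat) =>
      [pvSegStart dest n base res 0 j + (i : Int) * pvSegStep dest n base res 0 j,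
       pvSegStart dest n base res 1 j + (i : Int) * pvSegStep dest n base res 1 j]))

lemma pvInnerA (dx dy : Int) : ∀ (c : Nat) (ox oy : Int) (acc : List (List Int)),
    (List.range c).foldl
      (fun st2 (_ : Nat) => (st2.1 + dx, st2.2.1 + dy, st2.2.2 ++ [[st2.1, st2.2.1]]))
      (ox, oy, acc)
    = (ox + (c : Int) * dx, oy + (c : Int) * dy,
       acc ++ (List.range c).map (fun (i : Nat) => [ox + (i : Int) * dx, oy + (i : Int) * dy])) := by
  intro c
  induction c with
  | zero => intro ox oy acc; simp
  | succ m ih =>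
      intro ox oy acc
      rw [List.range_succ, List.foldl_append, ih]
      simp only [List.foldl_cons, List.foldl_nil]
      refine Prod.ext ?_ (Prod.ext ?_ ?_)
      · push_cast; ring
      · push_cast; ring
      · simp

lemma pvLoopA (dest : List (List Int)) (base res : Int) :
    ∀ k, k ≤ dest.length →
      (List.range k).foldl (pvBodyA dest res) (base, 0, 0, ([] : List (List Int)))
      = ((if k = dest.length ∧ 1 ≤ dest.length ∧ res ≠ 0 then base + res else base),
         pvSegStart dest dest.length base res 0 k,
         pvSegStart dest dest.length base res 1 k,
         pvOut dest dest.length base res k) := by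
  intro k
  induction k with
  | zero =>
      intro _
      have h0 : ¬ ((0 : Nat) = dest.length ∧ 1 ≤ dest.length ∧ res ≠ 0) := by
        rintro ⟨h1, h2, _⟩; omega
      simp [pvSegStart, pvOut, h0]
  | succ k ih =>
      intro hk
      have hklt : k < dest.length := by omega
      rw [List.range_succ, List.foldl_append, ih (by omega)]
      have hkne : ¬ (k = dest.length ∧ 1 ≤ dest.length ∧ res ≠ 0) := by
        rintro ⟨h1, _, _⟩; omega
      rw [if_neg hkne]
      simp only [List.foldl_cons, List.foldl_nil]
      show pvBodyA dest res (base, _, _, _) k = _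
      unfold pvBodyA
      have hcnt : (if k = dest.length - 1 ∧ res ≠ 0 then base + res else base)
          = pvSegCnt dest.length base res k := rfl
      by_cases hj : k = 0
      · subst hj
        simp only [reduceIte, hcnt]
        rw [pvInnerA]
        have hs0 : PySem.Int.truncdiv (pvGet2 dest ((0 : Nat) : Int) 0) (pvSegCnt dest.length base res 0)
            = pvSegStep dest dest.length base res 0 0 := by
          simp [pvSegStep]
        have hs1 : PySem.Int.truncdiv (pvGet2 dest ((0 : Nat) : Int) 1) (pvSegCnt dest.length base res 0)
            = pvSegStep dest dest.length base res 1 0 := by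
          simp [pvSegStep]
        rw [hs0, hs1]
        refine Prod.ext ?_ (Prod.ext ?_ (Prod.ext ?_ ?_))
        · show pvSegCnt dest.length base res 0
              = if 0 + 1 = dest.length ∧ 1 ≤ dest.length ∧ res ≠ 0 then base + res else base
          unfold pvSegCnt
          by_cases hr : res = 0 <;> [simp [hr]; skip] <;> simp [hr] <;> omega
        · simp [pvSegStart]
        · simp [pvSegStart]
        · show pvOut dest dest.length base res 0 ++ _ = pvOut dest dest.length base res 1
          simp [pvOut]
      · simp only [if_neg hj, hcnt]
        rw [pvInnerA]
        have hs : ∀ c : Int,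
            PySem.Int.truncdiv (pvGet2 dest (k : Int) c - pvGet2 dest ((k : Int) - 1) c)
                (pvSegCnt dest.length base res k)
            = pvSegStep dest dest.length base res c k := by
          intro c; simp [pvSegStep, hj]
        rw [hs 0, hs 1]
        refine Prod.ext ?_ (Prod.ext ?_ (Prod.ext ?_ ?_))
        · show pvSegCnt dest.length base res k
              = if k + 1 = dest.length ∧ 1 ≤ dest.length ∧ res ≠ 0 then base + res else base
          unfold pvSegCnt
          by_cases hr : res = 0 <;> [simp [hr]; skip] <;> simp [hr] <;> omega
        · simp [pvSegStart]
        · simp [pvSegStart]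
        · show pvOut dest dest.length base res k ++ _ = pvOut dest dest.length base res (k + 1)
          simp [pvOut, List.range_succ]

-- B's cnt at a cast index is the segment count
lemma pvCntB_cast (n : Nat) (base res : Int) (j : Nat) (hj : j < n) :
    pvCntB n base res (j : Int) = pvSegCnt n base res j := by
  unfold pvCntB pvSegCnt
  by_cases hr : res = 0
  · simp [hr]
  · by_cases h : j = n - 1
    · rw [if_pos ⟨by omega, hr⟩, if_pos ⟨h, hr⟩]
    · rw [if_neg (by rintro ⟨h1, _⟩; omega), if_neg (by rintro ⟨h1, _⟩; exact h h1)]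

-- B's step at a cast index, on a segment that emits frames
lemma pvStepB_cast (dest : List (List Int)) (n : Nat) (base res : Int) (c : Int) (j : Nat)
    (hj : j < n) (hpos : 0 < pvSegCnt n base res j) :
    pvStepB dest n base res (j : Int) c = pvSegStep dest n base res c j := by
  unfold pvStepB pvSegStep
  rw [pvCntB_cast n base res j hj, if_neg (by omega)]
  by_cases hj0 : j = 0
  · subst hj0; simp
  · have h0 : (0 : Int) < (j : Int) := by omega
    rw [if_pos h0, if_neg hj0]

-- lookup in a two-column map-of-range table
lemma pvGet2_map_range0 (f g : Nat → Int) (m j : Nat) (hj : j < m) :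
    pvGet2 ((List.range m).map (fun i => [f i, g i])) (j : Int) 0 = f j := by
  unfold pvGet2
  rw [PySem.List.pyGetD_natCast, PySem.List.getD_map_range _ m j [] hj]
  simp [PySem.List.pyGetD]

lemma pvGet2_map_range1 (f g : Nat → Int) (m j : Nat) (hj : j < m) :
    pvGet2 ((List.range m).map (fun i => [f i, g i])) (j : Int) 1 = g j := by
  unfold pvGet2
  rw [PySem.List.pyGetD_natCast, PySem.List.getD_map_range _ m j [] hj]
  simp [PySem.List.pyGetD]

-- the start table after the loop is the list of segment starts
lemma pvStartTbl (dest : List (List Int)) (n : Nat) (base res : Int) :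
    ∀ k, k ≤ n - 1 →
      (List.range k).foldl (fun st (j : Nat) =>
        st ++ [[pvGet2 st (j : Int) 0 + pvCntB n base res (j : Int) * pvStepB dest n base res (j : Int) 0,
                pvGet2 st (j : Int) 1 + pvCntB n base res (j : Int) * pvStepB dest n base res (j : Int) 1]])
        [[0, 0]]
      = (List.range (k + 1)).map (fun j =>
          [pvSegStart dest n base res 0 j, pvSegStart dest n base res 1 j]) := by
  intro k
  induction k with
  | zero => intro _; simp [pvSegStart]
  | succ k ih =>
      intro hk
      rw [List.range_succ, List.foldl_append, ih (by omega)]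
      simp only [List.foldl_cons, List.foldl_nil]
      have hkn : k < n := by omega
      rw [pvGet2_map_range0 _ _ (k + 1) k (by omega), pvGet2_map_range1 _ _ (k + 1) k (by omega)]
      rw [List.range_succ (n := k + 1), List.map_append]
      congr 1
      have hstep : ∀ c : Int,
          pvCntB n base res (k : Int) * pvStepB dest n base res (k : Int) c
          = ((pvSegCnt n base res k).toNat : Int) * pvSegStep dest n base res c k := by
        intro c
        by_cases hpos : 0 < pvSegCnt n base res k
        · rw [pvCntB_cast n base res k hkn, pvStepB_cast dest n base res c k hkn hpos,
              Int.toNat_of_nonneg hpos.le]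
        · have hz : pvStepB dest n base res (k : Int) c = 0 := by
            unfold pvStepB
            rw [pvCntB_cast n base res k hkn, if_pos (by omega)]
          have hz2 : (pvSegCnt n base res k).toNat = 0 := by omega
          rw [hz, hz2]; ring
      simp [pvSegStart, hstep 0, hstep 1]

-- the segment-start table, as B's row function sees it
def pvTbl (dest : List (List Int)) (n : Nat) (base res : Int) : List (List Int) :=
  (List.range n).map (fun j => [pvSegStart dest n base res 0 j, pvSegStart dest n base res 1 j])

-- B's row at a resolved (segment, in-segment-frame) pair
def pvRowAt (dest : List (List Int)) (n : Nat) (base res : Int) (ji : Int × Int) : List Int :=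
  [pvGet2 (pvTbl dest n base res) ji.1 0 + ji.2 * pvStepB dest n base res ji.1 0,
   pvGet2 (pvTbl dest n base res) ji.1 1 + ji.2 * pvStepB dest n base res ji.1 1]

-- B's row function with the start table already in closed form
def pvRowB (dest : List (List Int)) (n : Nat) (base res : Int) (t : Nat) : List Int :=
  pvRowAt dest n base res
    (if 0 < base then
      (min (PySem.Int.floordiv (t : Int) base) ((n : Int) - 1),
       (t : Int) - min (PySem.Int.floordiv (t : Int) base) ((n : Int) - 1) * base)
     else ((n : Int) - 1, (t : Int)))

-- evaluated row, when the pair resolves to segment j, frame i, and segment j emits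
lemma pvRowAt_eval (dest : List (List Int)) (n : Nat) (base res : Int) (j i : Nat)
    (hj : j < n) (hpos : 0 < pvSegCnt n base res j) :
    pvRowAt dest n base res ((j : Int), (i : Int))
    = [pvSegStart dest n base res 0 j + (i : Int) * pvSegStep dest n base res 0 j,
       pvSegStart dest n base res 1 j + (i : Int) * pvSegStep dest n base res 1 j] := by
  unfold pvRowAt pvTbl
  rw [pvGet2_map_range0 _ _ n j hj, pvGet2_map_range1 _ _ n j hj,
      pvStepB_cast dest n base res 0 j hj hpos, pvStepB_cast dest n base res 1 j hj hpos]

-- one-segment split of the emitted output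
lemma pvOut_succ (dest : List (List Int)) (n : Nat) (base res : Int) (k : Nat) :
    pvOut dest n base res (k + 1)
    = pvOut dest n base res k ++
      (List.range (pvSegCnt n base res k).toNat).map (fun (i : Nat) =>
        [pvSegStart dest n base res 0 k + (i : Int) * pvSegStep dest n base res 0 k,
         pvSegStart dest n base res 1 k + (i : Int) * pvSegStep dest n base res 1 k]) := by
  unfold pvOut
  rw [List.range_succ, List.flatMap_append]
  simp

-- positive base: the first k full segments of the flat frame scan
lemma pvFlatPos (dest : List (List Int)) (n : Nat) (base res : Int) (hb : 0 < base) :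
    ∀ k, k ≤ n - 1 →
      (List.range (k * base.toNat)).map (pvRowB dest n base res)
      = pvOut dest n base res k := by
  have hbn : ((base.toNat : Nat) : Int) = base := Int.toNat_of_nonneg hb.le
  intro k
  induction k with
  | zero => intro _; simp [pvOut]
  | succ k ih =>
      intro hk
      have hkn : k < n := by omega
      have hcnt : pvSegCnt n base res k = base := by
        unfold pvSegCnt; rw [if_neg]; rintro ⟨h1, _⟩; omega
      rw [Nat.succ_mul, List.range_add, List.map_append, List.map_map, ih (by omega),
          pvOut_succ, hcnt]
      congr 1
      apply List.map_congr_left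
      intro i hi
      rw [List.mem_range] at hi
      have hT : (((k * base.toNat + i : Nat)) : Int) = (k : Int) * base + (i : Int) := by
        push_cast [hbn]; ring
      have hilt : (i : Int) < base := by omega
      have hfd : PySem.Int.floordiv (((k * base.toNat + i : Nat)) : Int) base = (k : Int) := by
        rw [hT, PySem.Int.floordiv_eq_iff_of_pos hb]
        constructor
        · have : (0 : Int) ≤ (i : Int) := by positivity
          linarith
        · rw [add_mul, one_mul]; linarith
      have hmin : min ((k : Int)) ((n : Int) - 1) = (k : Int) := min_eq_left (by omega)
      show pvRowB dest n base res (k * base.toNat + i) = _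
      unfold pvRowB
      rw [if_pos hb, hfd, hmin]
      have hi2 : (((k * base.toNat + i : Nat)) : Int) - (k : Int) * base = (i : Int) := by
        rw [hT]; ring
      rw [hi2]
      exact pvRowAt_eval dest n base res k i hkn (by omega)

-- full flat frame scan equals the segment-wise output
lemma pvFlatTotal (dest : List (List Int)) (n : Nat) (base res : Int)
    (hn : 0 < n) (hres : 0 ≤ res) :
    (List.range ((if 0 < base then base * ((n : Int) - 1) + pvCntB n base res ((n : Int) - 1)
                  else max (pvCntB n base res ((n : Int) - 1)) 0).toNat)).map
      (pvRowB dest n base res)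
    = pvOut dest n base res n := by
  have hcast : (((n - 1 : Nat)) : Int) = (n : Int) - 1 := by omega
  have hlast : pvCntB n base res ((n : Int) - 1) = pvSegCnt n base res (n - 1) := by
    rw [← hcast, pvCntB_cast n base res (n - 1) (by omega)]
  have hsplit : pvOut dest n base res n
      = pvOut dest n base res (n - 1) ++
        (List.range (pvSegCnt n base res (n - 1)).toNat).map (fun (i : Nat) =>
          [pvSegStart dest n base res 0 (n - 1) + (i : Int) * pvSegStep dest n base res 0 (n - 1),
           pvSegStart dest n base res 1 (n - 1) + (i : Int) * pvSegStep dest n base res 1 (n - 1)]) := by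
    have h := pvOut_succ dest n base res (n - 1)
    rw [Nat.sub_add_cancel hn] at h
    exact h
  by_cases hb : 0 < base
  · rw [if_pos hb, hlast]
    have hbn : ((base.toNat : Nat) : Int) = base := Int.toNat_of_nonneg hb.le
    have hLpos : 0 < pvSegCnt n base res (n - 1) := by
      unfold pvSegCnt; split <;> omega
    have htot : (base * ((n : Int) - 1) + pvSegCnt n base res (n - 1)).toNat
        = (n - 1) * base.toNat + (pvSegCnt n base res (n - 1)).toNat := by
      have h1 : (((n - 1) * base.toNat + (pvSegCnt n base res (n - 1)).toNat : Nat) : Int)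
          = base * ((n : Int) - 1) + pvSegCnt n base res (n - 1) := by
        rw [Nat.cast_add, Nat.cast_mul, hcast, hbn, Int.toNat_of_nonneg hLpos.le]; ring
      rw [← h1, Int.toNat_natCast]
    rw [htot, List.range_add, List.map_append, List.map_map,
        pvFlatPos dest n base res hb (n - 1) le_rfl, hsplit]
    congr 1
    apply List.map_congr_left
    intro i hi
    rw [List.mem_range] at hi
    have hT : ((((n - 1) * base.toNat + i : Nat)) : Int) = ((n : Int) - 1) * base + (i : Int) := by
      push_cast [hbn, hcast]
      ring
    have hge : ((n : Int) - 1) ≤ PySem.Int.floordiv ((((n - 1) * base.toNat + i : Nat)) : Int) base := by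
      rw [hT, PySem.Int.le_floordiv_iff_mul_le hb]
      have : (0 : Int) ≤ (i : Int) := by positivity
      linarith
    have hmin : min (PySem.Int.floordiv ((((n - 1) * base.toNat + i : Nat)) : Int) base) ((n : Int) - 1)
        = (n : Int) - 1 := min_eq_right hge
    show pvRowB dest n base res ((n - 1) * base.toNat + i) = _
    unfold pvRowB
    rw [if_pos hb, hmin]
    have hi2 : ((((n - 1) * base.toNat + i : Nat)) : Int) - ((n : Int) - 1) * base = (i : Int) := by
      rw [hT]; ring
    rw [hi2, ← hcast]
    exact pvRowAt_eval dest n base res (n - 1) i (by omega) hLpos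
  · rw [if_neg hb, hlast]
    have hzero : pvOut dest n base res (n - 1) = [] := by
      unfold pvOut
      rw [List.flatMap_eq_nil_iff]
      intro j hj
      rw [List.mem_range] at hj
      have hcnt : pvSegCnt n base res j = base := by
        unfold pvSegCnt; rw [if_neg]; rintro ⟨h1, _⟩; omega
      have : (pvSegCnt n base res j).toNat = 0 := by omega
      rw [this]; simp
    rw [hsplit, hzero, List.nil_append]
    by_cases hL : pvSegCnt n base res (n - 1) ≤ 0
    · have h1 : max (pvSegCnt n base res (n - 1)) 0 = 0 := max_eq_right hL
      have h2 : (pvSegCnt n base res (n - 1)).toNat = 0 := by omega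
      rw [h1, h2]; simp
    · rw [max_eq_left (by omega : (0:Int) ≤ pvSegCnt n base res (n - 1))]
      apply List.map_congr_left
      intro t ht
      rw [List.mem_range] at ht
      show pvRowB dest n base res t = _
      unfold pvRowB
      rw [if_neg hb, ← hcast]
      exact pvRowAt_eval dest n base res (n - 1) t (by omega) (by omega)

-- ===== VERDICT (by name: the statement is the Claim_ definition above) =====
theorem imageTranslate_spec : Claim_equal_imageTranslate := by
  intro destination num_frame _hdom hpre
  obtain ⟨hne, -⟩ := hpre
  have hn : 0 < destination.length := List.length_pos_iff.mpr hne
  have hres : 0 ≤ PySem.Int.mod num_frame (destination.length : Int) :=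
    PySem.Int.mod_nonneg _ (by exact_mod_cast hn)
  unfold Spec_imageTranslate imageTranslate imageTranslate_alt
  show ((List.range destination.length).foldl
          (pvBodyA destination (PySem.Int.mod num_frame (destination.length : Int)))
          (PySem.Int.truncdiv num_frame (destination.length : Int), 0, 0, [])).2.2.2
      = (List.range ((if 0 < PySem.Int.truncdiv num_frame (destination.length : Int) then
            PySem.Int.truncdiv num_frame (destination.length : Int) * ((destination.length : Int) - 1) +
              pvCntB destination.length (PySem.Int.truncdiv num_frame (destination.length : Int))
                (PySem.Int.mod num_frame (destination.length : Int)) ((destination.length : Int) - 1)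
          else max (pvCntB destination.length (PySem.Int.truncdiv num_frame (destination.length : Int))
                (PySem.Int.mod num_frame (destination.length : Int)) ((destination.length : Int) - 1)) 0).toNat)).map
          (fun (t : Nat) =>
            let ji : Int × Int :=
              if 0 < PySem.Int.truncdiv num_frame (destination.length : Int) then
                let j := min (PySem.Int.floordiv (t : Int) (PySem.Int.truncdiv num_frame (destination.length : Int)))
                    ((destination.length : Int) - 1)
                (j, (t : Int) - j * PySem.Int.truncdiv num_frame (destination.length : Int))
              else ((destination.length : Int) - 1, (t : Int))
            [pvGet2 ((List.range (destination.length - 1)).foldl (fun st (j : Nat) =>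
                st ++ [[pvGet2 st (j : Int) 0 + pvCntB destination.length (PySem.Int.truncdiv num_frame (destination.length : Int)) (PySem.Int.mod num_frame (destination.length : Int)) (j : Int) * pvStepB destination destination.length (PySem.Int.truncdiv num_frame (destination.length : Int)) (PySem.Int.mod num_frame (destination.length : Int)) (j : Int) 0,
                        pvGet2 st (j : Int) 1 + pvCntB destination.length (PySem.Int.truncdiv num_frame (destination.length : Int)) (PySem.Int.mod num_frame (destination.length : Int)) (j : Int) * pvStepB destination destination.length (PySem.Int.truncdiv num_frame (destination.length : Int)) (PySem.Int.mod num_frame (destination.length : Int)) (j : Int) 1]]) [[0, 0]]) ji.1 0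
              + ji.2 * pvStepB destination destination.length (PySem.Int.truncdiv num_frame (destination.length : Int)) (PySem.Int.mod num_frame (destination.length : Int)) ji.1 0,
             pvGet2 ((List.range (destination.length - 1)).foldl (fun st (j : Nat) =>
                st ++ [[pvGet2 st (j : Int) 0 + pvCntB destination.length (PySem.Int.truncdiv num_frame (destination.length : Int)) (PySem.Int.mod num_frame (destination.length : Int)) (j : Int) * pvStepB destination destination.length (PySem.Int.truncdiv num_frame (destination.length : Int)) (PySem.Int.mod num_frame (destination.length : Int)) (j : Int) 0,
                        pvGet2 st (j : Int) 1 + pvCntB destination.length (PySem.Int.truncdiv num_frame (destination.length : Int)) (PySem.Int.mod num_frame (destination.length : Int)) (j : Int) * pvStepB destination destination.length (PySem.Int.truncdiv num_frame (destination.length : Int)) (PySem.Int.mod num_frame (destination.length : Int)) (j : Int) 1]]) [[0, 0]]) ji.1 1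
              + ji.2 * pvStepB destination destination.length (PySem.Int.truncdiv num_frame (destination.length : Int)) (PySem.Int.mod num_frame (destination.length : Int)) ji.1 1])
  rw [pvLoopA destination _ _ destination.length le_rfl]
  simp only [pvStartTbl destination destination.length
      (PySem.Int.truncdiv num_frame (destination.length : Int))
      (PySem.Int.mod num_frame (destination.length : Int)) (destination.length - 1) le_rfl,
    Nat.sub_add_cancel hn]
  exact (pvFlatTotal destination destination.length
      (PySem.Int.truncdiv num_frame (destination.length : Int))
      (PySem.Int.mod num_frame (destination.length : Int)) hn hres).symm
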